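-- pv_equiv track=rewrite | github.com/MinSeo-Ming/Algo_Solved | 프로그래머스/1/159994. 카드 뭉치/카드 뭉치.py | solution
-- ===== SOURCE A (Python) =====
-- def solution(cards1, cards2, goal):
--     answer = ''
--     for word in goal:
--         if (word) in cards1:
--             if cards1.index(word)!=0:
--                 return "No"
--             else:
--                 cards1.remove(word)
--                 # goal.remove(word)
--         elif  (word) in cards2:
--             if cards2.index(word)!=0:
--                 return "No"
--             else:
--                 cards2.remove(word)
--                 # goal.remove(word)
--         else:
--             return "No"
--
-- #     if len(goal)>0:
-- #         return "No"
--
--     return "Yes"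
-- ===== SOURCE B (Python) =====
-- def solution(cards1, cards2, goal):
--     # One pass: front pointers per deck + remaining-element counters for O(1)
--     # membership, instead of A's repeated `in`/`index`/`remove` scans.
--     # (A mutates cards1/cards2 in place; B does not — return value is the same.)
--     cnt1 = {}
--     for w in cards1:
--         cnt1[w] = cnt1.get(w, 0) + 1
--     cnt2 = {}
--     for w in cards2:
--         cnt2[w] = cnt2.get(w, 0) + 1
--     i = j = 0
--     for w in goal:
--         if cnt1.get(w, 0) > 0:
--             if cards1[i] != w:
--                 return "No"
--             cnt1[w] -= 1
--             i += 1
--         elif cnt2.get(w, 0) > 0: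
--             if cards2[j] != w:
--                 return "No"
--             cnt2[w] -= 1
--             j += 1
--         else:
--             return "No"
--     return "Yes"
-- ===== Notes on version B (the rewrite author's own statement) =====
-- stated objective: faster
-- what changed: Replaces A's per-goal-card `in`/`index`/`remove` scans over the mutating decks by a single pass with a front pointer per deck plus counters of the remaining deck elements for O(1) membership; B does not mutate cards1/cards2.
import Mathlib
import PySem

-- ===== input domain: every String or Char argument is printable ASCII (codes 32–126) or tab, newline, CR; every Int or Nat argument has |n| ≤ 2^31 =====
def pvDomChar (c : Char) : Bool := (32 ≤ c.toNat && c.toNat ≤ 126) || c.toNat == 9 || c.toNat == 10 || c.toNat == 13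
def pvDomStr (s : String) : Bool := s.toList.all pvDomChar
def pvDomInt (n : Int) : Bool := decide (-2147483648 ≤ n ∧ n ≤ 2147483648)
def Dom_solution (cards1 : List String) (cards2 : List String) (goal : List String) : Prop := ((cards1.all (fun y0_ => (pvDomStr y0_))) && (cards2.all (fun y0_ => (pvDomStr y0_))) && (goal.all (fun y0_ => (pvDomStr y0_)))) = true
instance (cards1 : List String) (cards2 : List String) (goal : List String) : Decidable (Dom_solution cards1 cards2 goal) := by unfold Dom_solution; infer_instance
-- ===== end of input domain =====

-- B replaces A's repeated `in`/`index`/`remove` scans over the shrinking decks by one pass with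
-- front pointers and remaining-element counters (objective: faster). A mutates cards1/cards2 in
-- place (remove); B does not — the equivalence proved here is about the return value.


-- ===== PORT A =====
def solution (cards1 : List String) (cards2 : List String) (goal : List String) : String :=
  match goal with
  | [] => "Yes"
  | word :: rest =>
    if cards1.contains word then
      if PySem.List.index? cards1 word ≠ some 0 then "No"
      else solution ((PySem.List.remove? cards1 word).getD cards1) cards2 rest
    else if cards2.contains word then
      if PySem.List.index? cards2 word ≠ some 0 then "No"
      else solution cards1 ((PySem.List.remove? cards2 word).getD cards2) rest
    else "No"

-- ===== PORT B =====
-- loop over goal with front pointers i, j and counters of the not-yet-consumed deck elements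
def solutionAltLoop (cards1 : List String) (cards2 : List String)
    (cnt1 cnt2 : PySem.Dict String Int) (i j : Int) (goal : List String) : String :=
  match goal with
  | [] => "Yes"
  | w :: rest =>
    if cnt1.getD w 0 > 0 then
      if (PySem.List.pyGet? cards1 i).getD "" ≠ w then "No"
      else solutionAltLoop cards1 cards2 (cnt1.modify w 0 (· - 1)) cnt2 (i + 1) j rest
    else if cnt2.getD w 0 > 0 then
      if (PySem.List.pyGet? cards2 j).getD "" ≠ w then "No"
      else solutionAltLoop cards1 cards2 cnt1 (cnt2.modify w 0 (· - 1)) i (j + 1) rest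
    else "No"

def solution_alt (cards1 : List String) (cards2 : List String) (goal : List String) : String :=
  solutionAltLoop cards1 cards2
    (cards1.foldl (fun d x => d.insert x (d.getD x 0 + 1)) PySem.Dict.empty)
    (cards2.foldl (fun d x => d.insert x (d.getD x 0 + 1)) PySem.Dict.empty)
    0 0 goal

-- ===== PRECONDITION & SPEC =====
def Spec_solution (cards1 : List String) (cards2 : List String) (goal : List String) (out : String) : Prop := out = solution_alt cards1 cards2 goal
instance (cards1 : List String) (cards2 : List String) (goal : List String) (out : String) : Decidable (Spec_solution cards1 cards2 goal out) := by unfold Spec_solution; infer_instance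

-- ===== CLAIM (what is proved, stated in full; the proofs are below) =====
def Claim_equal_solution : Prop := ∀ (cards1 : List String) (cards2 : List String) (goal : List String), Dom_solution cards1 cards2 goal → Spec_solution cards1 cards2 goal (solution cards1 cards2 goal)

-- ===== LEMMAS AND PROOFS =====

-- Invariant: A's shrinking decks are exactly cards1.drop i / cards2.drop j, and each counter's
-- values are the element counts of the corresponding remaining suffix.
theorem loop_eq (goal : List String) : ∀ (cards1 cards2 : List String) (i j : Nat)
    (cnt1 cnt2 : PySem.Dict String Int)
    (h1 : ∀ w, cnt1.getD w 0 = ((cards1.drop i).count w : Int))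
    (h2 : ∀ w, cnt2.getD w 0 = ((cards2.drop j).count w : Int)),
    solution (cards1.drop i) (cards2.drop j) goal
      = solutionAltLoop cards1 cards2 cnt1 cnt2 (i : Int) (j : Int) goal := by
  induction goal with
  | nil => intro cards1 cards2 i j cnt1 cnt2 _ _; rfl
  | cons w rest ih =>
    intro cards1 cards2 i j cnt1 cnt2 h1 h2
    by_cases hm1 : w ∈ cards1.drop i
    · have hi : i < cards1.length := by
        by_contra hle
        rw [List.drop_eq_nil_of_le (by omega)] at hm1
        simp at hm1
      have hd1 : cards1.drop i = cards1[i] :: cards1.drop (i + 1) := List.drop_eq_getElem_cons hi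
      have hget : PySem.List.pyGet? cards1 (i : Int) = some cards1[i] := by
        simp [PySem.List.pyGet?_natCast, List.getElem?_eq_getElem hi]
      have hcnt1 : cnt1.getD w 0 > 0 := by
        rw [h1]; exact_mod_cast List.count_pos_iff.mpr hm1
      by_cases hw : cards1[i] = w
      · -- head of the remaining first deck matches: both sides consume it
        have hnew : ∀ v, (cnt1.modify w 0 (· - 1)).getD v 0 = ((cards1.drop (i + 1)).count v : Int) := by
          intro v
          rw [PySem.Dict.getD_modify]
          by_cases hv : v = w
          · subst hv
            rw [h1 v, hd1, hw, List.count_cons_self]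
            push_cast
            simp
          · rw [if_neg hv, h1 v, hd1, List.count_cons]
            have hne : ¬ cards1[i] = v := by rw [hw]; exact fun h => hv h.symm
            simp [hne]
        have hrec := ih cards1 cards2 (i + 1) j (cnt1.modify w 0 (· - 1)) cnt2 hnew h2
        rw [hd1, hw]
        show solution (w :: cards1.drop (i + 1)) (cards2.drop j) (w :: rest) = _
        rw [solution, solutionAltLoop]
        simp only [List.contains_cons, BEq.rfl, Bool.true_or, if_true,
          PySem.List.index?_cons_self, ne_eq, not_true_eq_false, if_false,
          PySem.List.remove?_cons_self, Option.getD_some]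
        rw [if_pos hcnt1, hget]
        simp only [Option.getD_some, hw, not_true_eq_false, if_false]
        push_cast at hrec
        exact hrec
      · -- w occurs in the remaining first deck but not at its front: both return "No"
        have hmem' : w ∈ cards1.drop (i + 1) := by
          rw [hd1] at hm1
          rcases List.mem_cons.mp hm1 with h | h
          · exact absurd h.symm hw
          · exact h
        obtain ⟨k, hk⟩ := Option.isSome_iff_exists.mp
          ((PySem.List.index?_isSome_iff (cards1.drop (i + 1)) w).mpr hmem')
        rw [hd1]
        rw [solution, solutionAltLoop]
        have hcontains : (cards1[i] :: cards1.drop (i + 1)).contains w = true := by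
          rw [← hd1]; simpa using hm1
        rw [if_pos hcontains]
        rw [PySem.List.index?_cons_of_ne _ hw, hk]
        simp only [Option.map_some, ne_eq, Option.some.injEq, Nat.succ_ne_zero,
          not_false_eq_true, if_true]
        rw [if_pos hcnt1, hget]
        simp only [Option.getD_some, hw, not_false_eq_true, if_true]
    · -- w is not in the remaining first deck
      have hc1 : ¬ cnt1.getD w 0 > 0 := by
        rw [h1]
        simp [List.count_eq_zero_of_not_mem hm1]
      by_cases hm2 : w ∈ cards2.drop j
      · have hj : j < cards2.length := by
          by_contra hle
          rw [List.drop_eq_nil_of_le (by omega)] at hm2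
          simp at hm2
        have hd2 : cards2.drop j = cards2[j] :: cards2.drop (j + 1) := List.drop_eq_getElem_cons hj
        have hget : PySem.List.pyGet? cards2 (j : Int) = some cards2[j] := by
          simp [PySem.List.pyGet?_natCast, List.getElem?_eq_getElem hj]
        have hcnt2 : cnt2.getD w 0 > 0 := by
          rw [h2]; exact_mod_cast List.count_pos_iff.mpr hm2
        by_cases hw : cards2[j] = w
        · have hnew : ∀ v, (cnt2.modify w 0 (· - 1)).getD v 0 = ((cards2.drop (j + 1)).count v : Int) := by
            intro v
            rw [PySem.Dict.getD_modify]
            by_cases hv : v = w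
            · subst hv
              rw [h2 v, hd2, hw, List.count_cons_self]
              push_cast
              simp
            · rw [if_neg hv, h2 v, hd2, List.count_cons]
              have hne : ¬ cards2[j] = v := by rw [hw]; exact fun h => hv h.symm
              simp [hne]
          have hrec := ih cards1 cards2 i (j + 1) cnt1 (cnt2.modify w 0 (· - 1)) h1 hnew
          rw [hd2, hw]
          show solution (cards1.drop i) (w :: cards2.drop (j + 1)) (w :: rest) = _
          rw [solution, solutionAltLoop]
          rw [if_neg (by simpa using hm1), if_pos (by simp),
            if_neg (by rw [PySem.List.index?_cons_self]; simp),
            if_neg hc1, if_pos hcnt2, hget]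
          simp only [PySem.List.remove?_cons_self, Option.getD_some, hw, ne_eq,
            not_true_eq_false, if_false]
          push_cast at hrec
          exact hrec
        · have hmem' : w ∈ cards2.drop (j + 1) := by
            rw [hd2] at hm2
            rcases List.mem_cons.mp hm2 with h | h
            · exact absurd h.symm hw
            · exact h
          obtain ⟨k, hk⟩ := Option.isSome_iff_exists.mp
            ((PySem.List.index?_isSome_iff (cards2.drop (j + 1)) w).mpr hmem')
          rw [hd2]
          rw [solution, solutionAltLoop]
          have hcontains : (cards2[j] :: cards2.drop (j + 1)).contains w = true := by
            rw [← hd2]; simpa using hm2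
          rw [if_neg (by simpa using hm1), if_pos hcontains,
            PySem.List.index?_cons_of_ne _ hw, hk]
          simp only [Option.map_some, ne_eq, Option.some.injEq, Nat.succ_ne_zero,
            not_false_eq_true, if_true]
          rw [if_neg hc1, if_pos hcnt2, hget]
          simp only [Option.getD_some, hw, not_false_eq_true, if_true]
      · -- w in neither remaining deck: both return "No"
        have hc2 : ¬ cnt2.getD w 0 > 0 := by
          rw [h2]
          simp [List.count_eq_zero_of_not_mem hm2]
        rw [solution, solutionAltLoop]
        rw [if_neg (by simpa using hm1), if_neg (by simpa using hm2),
          if_neg hc1, if_neg hc2]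

theorem solution_spec : Claim_equal_solution := by
  intro cards1 cards2 goal _
  unfold Spec_solution solution_alt
  have h1 : ∀ w, (cards1.foldl (fun d x => d.insert x (d.getD x 0 + 1)) PySem.Dict.empty).getD w 0
      = (((cards1.drop 0).count w : Nat) : Int) := by
    intro w; rw [PySem.Dict.getD_foldl_insert_add_one]; simp
  have h2 : ∀ w, (cards2.foldl (fun d x => d.insert x (d.getD x 0 + 1)) PySem.Dict.empty).getD w 0
      = (((cards2.drop 0).count w : Nat) : Int) := by
    intro w; rw [PySem.Dict.getD_foldl_insert_add_one]; simp
  have h := loop_eq goal cards1 cards2 0 0 _ _ h1 h2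
  simpa using h
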